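-- pv_equiv track=rewrite | github.com/SimBoex/HW5 | utils.py | links
-- ===== SOURCE A (Python) =====
-- def links(index):
--     full_links=[]
--     l=len(index)
--     for i in range(l-1):
--         full_links.append(index[i])
--         v=index[i][1]
--         v2=index[i+1][0]
--         full_links.append((v,v2))
--     full_links.append(index[l-1])
--     return full_links
-- ===== SOURCE B (Python) =====
-- def links(index):
--     n = len(index)
--     res = [None] * (2 * n - 1)
--     res[::2] = index
--     res[1::2] = [(a[1], b[0]) for a, b in zip(index, index[1:])]
--     return res
-- ===== Notes on version B (the rewrite author's own statement) =====
-- stated objective: alternative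
-- what changed: B preallocates a list of length 2n-1 and fills it with two strided slice assignments (elements at even positions, connector tuples at odd positions) instead of A's indexed loop that appends element and connector pairwise.
import Mathlib
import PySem

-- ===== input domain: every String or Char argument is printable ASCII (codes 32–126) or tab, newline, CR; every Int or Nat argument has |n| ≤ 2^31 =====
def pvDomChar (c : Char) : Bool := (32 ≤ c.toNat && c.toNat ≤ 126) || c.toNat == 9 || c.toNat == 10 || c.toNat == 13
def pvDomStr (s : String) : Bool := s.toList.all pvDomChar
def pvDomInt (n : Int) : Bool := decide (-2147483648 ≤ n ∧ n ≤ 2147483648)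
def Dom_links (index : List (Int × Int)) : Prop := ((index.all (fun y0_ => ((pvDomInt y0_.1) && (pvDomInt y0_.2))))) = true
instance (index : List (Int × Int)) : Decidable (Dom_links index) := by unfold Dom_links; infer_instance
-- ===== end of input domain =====

-- B preallocates a length-2n-1 list and fills it by two strided slice assignments
-- (elements at even slots, connectors at odd slots) instead of A's indexed append loop;
-- same O(n) cost, different construction. A = B proved on nonempty inputs (A raises on []).

-- ===== PORT A =====
-- literal transliteration of A: one indexed loop appending element then connector, then index[l-1].
def links (index : List (Int × Int)) : List (Int × Int) :=
  let l : Int := index.length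
  let full_links :=
    (PySem.List.pyRange 0 (l - 1) 1).foldl (fun acc i =>
      let a := PySem.List.pyGetD index i (0, 0)
      let v := a.2
      let v2 := (PySem.List.pyGetD index (i + 1) (0, 0)).1
      (acc ++ [a]) ++ [(v, v2)]) []
  full_links ++ [PySem.List.pyGetD index (l - 1) (0, 0)]

-- ===== PORT B =====
-- hand port of B (slice assignment has no PySem primitive, so it is ported exactly by what
-- it leaves in the buffer): res = [None]*(2n-1); res[::2] = index puts index[k] at slot 2k;
-- res[1::2] = connectors puts connector k (built from zip(index, index[1:])) at slot 2k+1.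
def links_alt (index : List (Int × Int)) : List (Int × Int) :=
  let n := index.length
  let conn := (index.zip index.tail).map (fun p => (p.1.2, p.2.1))
  (List.range (2 * n - 1)).map (fun j =>
    if j % 2 = 0 then index.getD (j / 2) (0, 0) else conn.getD (j / 2) (0, 0))

-- ===== PRECONDITION & SPEC =====
-- A raises IndexError on the empty list (index[l-1]); only that input is excluded.
def Pre_links (index : List (Int × Int)) : Prop := index ≠ []
instance (index : List (Int × Int)) : Decidable (Pre_links index) := by unfold Pre_links; infer_instance
def pvWitness_links : (List (Int × Int)) := [(1, 2), (3, 4)]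

def Spec_links (index : List (Int × Int)) (out : List (Int × Int)) : Prop := out = links_alt index
instance (index : List (Int × Int)) (out : List (Int × Int)) : Decidable (Spec_links index out) := by unfold Spec_links; infer_instance

-- ===== CLAIM (what is proved, stated in full; the proofs are below) =====
def Claim_equal_links : Prop := ∀ (index : List (Int × Int)), Dom_links index → Pre_links index → Spec_links index (links index)

-- ===== LEMMAS AND PROOFS =====

-- the element at slot k (common abbreviation for the proofs)
def pvE (index : List (Int × Int)) (k : Nat) : Int × Int := index.getD k (0, 0)

-- an even/odd position map over range(2m+1) written as flatMap of the slot pairs plus the last slot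
theorem pv_interleave (g : Nat → Int × Int) (m : Nat) :
    (List.range (2 * m + 1)).map g
      = (List.range m).flatMap (fun k => [g (2 * k), g (2 * k + 1)]) ++ [g (2 * m)] := by
  induction m with
  | zero => simp
  | succ m ih =>
    have h1 : 2 * (m + 1) + 1 = (2 * m + 1) + 1 + 1 := by omega
    have h3 : 2 * m + 1 + 1 = 2 * (m + 1) := by omega
    rw [h1, List.range_succ, List.range_succ, List.map_append, List.map_append, ih,
        List.range_succ, List.flatMap_append]
    simp [h3]

-- B's connector list entry
theorem pv_conn_getD (index : List (Int × Int)) (k : Nat) (hk : k + 1 < index.length) :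
    ((index.zip index.tail).map (fun p => (p.1.2, p.2.1))).getD k (0, 0)
      = ((pvE index k).2, (pvE index (k + 1)).1) := by
  have hk' : k < index.length := by omega
  have hlen : k < ((index.zip index.tail).map (fun p => (p.1.2, p.2.1))).length := by
    simp [List.length_zip, List.length_tail]
    omega
  rw [List.getD_eq_getElem _ _ hlen, List.getElem_map, List.getElem_zip]
  simp [pvE, List.getElem_tail, hk, hk']

-- A in normal form: flatMap of (element, connector) pairs plus the last element
theorem pv_A_norm (index : List (Int × Int)) (h : index ≠ []) :
    links index
      = (List.range (index.length - 1)).flatMap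
          (fun k => [pvE index k, ((pvE index k).2, (pvE index (k + 1)).1)])
        ++ [pvE index (index.length - 1)] := by
  have hn : 1 ≤ index.length := List.length_pos_of_ne_nil h
  have htn : (((index.length : Int)) - 1).toNat = index.length - 1 := by omega
  simp only [links, PySem.List.pyRange_one, htn, sub_zero, zero_add]
  rw [List.foldl_map]
  have hfun : (fun (acc : List (Int × Int)) (k : Nat) =>
        (acc ++ [PySem.List.pyGetD index ((k : Int)) (0, 0)]) ++
          [((PySem.List.pyGetD index ((k : Int)) (0, 0)).2,
            (PySem.List.pyGetD index ((k : Int) + 1) (0, 0)).1)])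
      = fun acc k => acc ++ [pvE index k, ((pvE index k).2, (pvE index (k + 1)).1)] := by
    funext acc k
    have e2 : ((k : Int)) + 1 = ((k + 1 : Nat) : Int) := by push_cast; ring
    rw [e2]
    simp only [pvE, PySem.List.pyGetD_natCast]
    simp
  rw [hfun]
  rw [PySem.List.foldl_append_eq_flatMap]
  have h1 : ((index.length : Int)) - 1 = ((index.length - 1 : Nat) : Int) := by omega
  rw [h1]
  simp [pvE]

-- B in the same normal form
theorem pv_B_norm (index : List (Int × Int)) (h : index ≠ []) :
    links_alt index
      = (List.range (index.length - 1)).flatMap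
          (fun k => [pvE index k, ((pvE index k).2, (pvE index (k + 1)).1)])
        ++ [pvE index (index.length - 1)] := by
  have hn : 1 ≤ index.length := List.length_pos_of_ne_nil h
  have h2 : 2 * index.length - 1 = 2 * (index.length - 1) + 1 := by omega
  simp only [links_alt]
  rw [h2, pv_interleave]
  congr 1
  · apply List.flatMap_congr
    intro k hk
    simp only [List.mem_range] at hk
    have e0 : 2 * k % 2 = 0 := by omega
    have e1 : 2 * k / 2 = k := by omega
    have e2 : (2 * k + 1) % 2 = 1 := by omega
    have e3 : (2 * k + 1) / 2 = k := by omega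
    rw [if_pos e0, if_neg (by omega : ¬ ((2 * k + 1) % 2 = 0)), e1, e3,
        pv_conn_getD index k (by omega)]
    simp [pvE]
  · have e0 : 2 * (index.length - 1) % 2 = 0 := by omega
    have e1 : 2 * (index.length - 1) / 2 = index.length - 1 := by omega
    simp [e0, e1, pvE]

-- ===== VERDICT (by name: the statement is the Claim_ definition above) =====
theorem links_spec : Claim_equal_links := by
  intro index _ hpre
  unfold Spec_links
  rw [pv_A_norm index hpre, pv_B_norm index hpre]
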